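-- pv_equiv track=rewrite | github.com/kw-pp/algorithm_Study | susie/Programmers/20220730_test01.py | solution
-- ===== SOURCE A (Python) =====
-- from collections import defaultdict
--
-- def solution(X, Y):
--     dic = defaultdict(int)
--     twin = []
--     sub_x, sub_y = str(X), str(Y)
--
--     for y in sub_y:
--         dic[y] += 1
--
--     for x in sub_x:
--         if dic[x]:
--             dic[x] -= 1
--             twin.append(x)
--
--     if len(twin) == 0:
--         return "-1"
--
--     twin.sort(key=lambda x:-int(x))
--     ans = ''.join(twin)
--     if ans[0] == '0':
--         return '0'
--     return ans
-- ===== SOURCE B (Python) =====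
-- from collections import Counter
--
-- def solution(X, Y):
--     cx, cy = Counter(str(X)), Counter(str(Y))
--     parts = []
--     for d in "9876543210":
--         parts.append(d * min(cx[d], cy[d]))
--     ans = ''.join(parts)
--     if not ans:
--         return "-1"
--     return '0' if ans[0] == '0' else ans
-- ===== Notes on version B (the rewrite author's own statement) =====
-- stated objective: simpler
-- what changed: B replaces A's defaultdict bookkeeping loop plus list sort by intersecting two Counters and emitting each digit 9..0 repeated min(cx[d],cy[d]) times (a counting-sort style single descending pass); no comparison sort and no mutable dict state.
-- crash fix: When both X and Y are negative, A raises ValueError (the common character '-' reaches the sort key int(x)); B ignores the signs and returns the descending common-digit string ('-1' if the numbers share no digit, '0' if only zeros). — e.g. on solution(-12, -21): A raises ValueError, B returns "21"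
import Mathlib
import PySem

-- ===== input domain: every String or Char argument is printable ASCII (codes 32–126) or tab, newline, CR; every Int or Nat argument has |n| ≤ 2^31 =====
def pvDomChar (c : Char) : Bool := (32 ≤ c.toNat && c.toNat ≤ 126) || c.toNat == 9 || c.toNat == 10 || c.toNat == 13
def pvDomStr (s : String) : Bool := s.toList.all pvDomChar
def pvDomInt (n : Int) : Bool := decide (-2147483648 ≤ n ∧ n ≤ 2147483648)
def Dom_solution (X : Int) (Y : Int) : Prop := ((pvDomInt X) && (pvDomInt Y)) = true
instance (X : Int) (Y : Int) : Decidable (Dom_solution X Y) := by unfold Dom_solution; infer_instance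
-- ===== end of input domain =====

-- B replaces A's defaultdict bookkeeping + list sort by two Counters and a single
-- counting-sort style descending pass over the ten digits (objective: simpler).
-- Equivalence is over the RETURN value; neither version mutates its arguments.

-- ===== PORT A =====
-- the body of A's second for-loop (dic, twin are the loop state)
def aStep (st : PySem.Dict Char Int × List Char) (x : Char) : PySem.Dict Char Int × List Char :=
  if st.1.getD x 0 ≠ 0 then (st.1.modify x 0 (fun v => v - 1), st.2 ++ [x]) else st

-- key=lambda x: -int(x); int(x) raises ValueError on '-' (Pre_ excludes that), getD 0 is never
-- reached on inputs inside Pre_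
def aKey (c : Char) : Int := -((PySem.Int.ofChars? [c]).getD 0)

def solution (X : Int) (Y : Int) : String :=
  let sub_x := (PySem.Int.toStr X).toList
  let sub_y := (PySem.Int.toStr Y).toList
  let dic := sub_y.foldl (fun d y => d.modify y 0 (fun v => v + 1)) PySem.Dict.empty
  let res := sub_x.foldl aStep (dic, [])
  let twin := res.2
  if twin.length = 0 then "-1"
  else
    let tw := PySem.List.sorted twin aKey false
    if PySem.List.pyGet? tw 0 = some '0' then "0" else String.ofList tw

-- ===== PORT B =====
def solution_alt (X : Int) (Y : Int) : String :=
  let cx := PySem.Dict.counter (PySem.Int.toStr X).toList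
  let cy := PySem.Dict.counter (PySem.Int.toStr Y).toList
  let parts := "9876543210".toList.foldl
    (fun ps d => ps ++ [List.replicate (min (cx.getD d 0) (cy.getD d 0)).toNat d]) []
  let ans := parts.flatten
  if ans = [] then "-1"
  else if PySem.List.pyGet? ans 0 = some '0' then "0" else String.ofList ans

-- ===== PRECONDITION & SPEC =====
-- Pre_ excludes exactly X < 0 ∧ Y < 0: there '-' is a common character, twin is nonempty and
-- A's sort key int('-') raises ValueError, so A returns no value.
def Pre_solution (X : Int) (Y : Int) : Prop := 0 ≤ X ∨ 0 ≤ Y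
instance (X : Int) (Y : Int) : Decidable (Pre_solution X Y) := by unfold Pre_solution; infer_instance
def pvWitness_solution : Int × Int := (1045, 504)

-- When X < 0 and Y < 0, A raises ValueError (int('-') inside the sort key); B returns the
-- descending string of the common digits (or "-1" / "0"), ignoring the signs.
def Raises_solution (X : Int) (Y : Int) : Prop := X < 0 ∧ Y < 0
instance (X : Int) (Y : Int) : Decidable (Raises_solution X Y) := by unfold Raises_solution; infer_instance
def pvRaiseWitness_solution : Int × Int := (-12, -21)
def pvRaiseWitnessOut_solution : String := "21"

def Spec_solution (X : Int) (Y : Int) (out : String) : Prop := out = solution_alt X Y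
instance (X : Int) (Y : Int) (out : String) : Decidable (Spec_solution X Y out) := by unfold Spec_solution; infer_instance

-- ===== CLAIM (what is proved, stated in full; the proofs are below) =====
def Claim_equal_solution : Prop := ∀ (X : Int) (Y : Int), Dom_solution X Y → Pre_solution X Y → Spec_solution X Y (solution X Y)
def Claim_raises_solution : Prop := (∀ (X : Int) (Y : Int), Dom_solution X Y → Raises_solution X Y → ¬ Pre_solution X Y) ∧ (Dom_solution (pvRaiseWitness_solution.1) (pvRaiseWitness_solution.2) ∧ Raises_solution (pvRaiseWitness_solution.1) (pvRaiseWitness_solution.2) ∧ solution_alt (pvRaiseWitness_solution.1) (pvRaiseWitness_solution.2) = pvRaiseWitnessOut_solution)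

-- ===== LEMMAS AND PROOFS =====

-- the ten digit characters, in B's iteration order
def D10 : List Char := ['9', '8', '7', '6', '5', '4', '3', '2', '1', '0']

-- every character produced by Nat.toDigits 10 is a decimal digit
lemma mem_toDigitsCore (fuel : Nat) : ∀ (n : Nat) (ds : List Char) (c : Char),
    c ∈ Nat.toDigitsCore 10 fuel n ds → c ∈ ds ∨ c ∈ D10 := by
  induction fuel with
  | zero => intro n ds c h; exact Or.inl h
  | succ fuel ih =>
    intro n ds c h
    have hd : (n % 10).digitChar ∈ D10 := by
      have h10 : n % 10 < 10 := Nat.mod_lt _ (by norm_num)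
      interval_cases h' : n % 10 <;> simp [Nat.digitChar, D10]
    simp only [Nat.toDigitsCore] at h
    split at h
    · rcases List.mem_cons.mp h with h | h
      · exact Or.inr (h ▸ hd)
      · exact Or.inl h
    · rcases ih (n / 10) ((n % 10).digitChar :: ds) c h with h' | h'
      · rcases List.mem_cons.mp h' with h' | h'
        · exact Or.inr (h' ▸ hd)
        · exact Or.inl h'
      · exact Or.inr h'

lemma mem_toChars (n : Int) (c : Char) (h : c ∈ PySem.Int.toChars n) : c = '-' ∨ c ∈ D10 := by
  unfold PySem.Int.toChars at h
  split at h
  · rcases List.mem_cons.mp h with h | h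
    · exact Or.inl h
    · unfold Nat.toDigits at h
      rcases mem_toDigitsCore _ _ _ _ h with h' | h'
      · exact absurd h' List.not_mem_nil
      · exact Or.inr h'
  · unfold Nat.toDigits at h
    rcases mem_toDigitsCore _ _ _ _ h with h' | h'
    · exact absurd h' List.not_mem_nil
    · exact Or.inr h'

lemma neg_not_mem_toChars (n : Int) (h : 0 ≤ n) : '-' ∉ PySem.Int.toChars n := by
  intro hm
  unfold PySem.Int.toChars at hm
  rw [if_neg (by omega)] at hm
  unfold Nat.toDigits at hm
  rcases mem_toDigitsCore _ _ _ _ hm with h' | h'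
  · exact absurd h' List.not_mem_nil
  · simp [D10] at h'

-- A's second loop: the multiset of collected characters is the min of the two counts
lemma aLoop_count (l : List Char) (d : PySem.Dict Char Int) (t : List Char)
    (hd : ∀ c, 0 ≤ d.getD c 0) (c : Char) :
    ((l.foldl aStep (d, t)).2).count c = t.count c + min (l.count c) (d.getD c 0).toNat := by
  induction l generalizing d t with
  | nil => simp
  | cons x l ih =>
    simp only [List.foldl_cons]
    by_cases hx : d.getD x 0 ≠ 0
    · have hx1 : 1 ≤ d.getD x 0 := by have := hd x; omega
      rw [show aStep (d, t) x = (d.modify x 0 (fun v => v - 1), t ++ [x]) from by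
        simp [aStep, hx]]
      have hd' : ∀ c', 0 ≤ (d.modify x 0 (fun v => v - 1)).getD c' 0 := by
        intro c'
        rw [PySem.Dict.getD_modify]
        split
        · omega
        · exact hd c'
      rw [ih _ _ hd', PySem.Dict.getD_modify]
      by_cases hcx : c = x
      · subst hcx
        simp only [List.count_append, List.count_cons, List.count_nil,
          beq_self_eq_true, if_true]
        omega
      · simp only [if_neg hcx, List.count_append, List.count_cons, List.count_nil]
        have hxc : (x == c) = false := by simp [Ne.symm hcx]
        simp [hxc]
    · rw [show aStep (d, t) x = (d, t) from by simp [aStep, hx]]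
      rw [ih _ _ hd]
      rw [not_not] at hx
      by_cases hcx : c = x
      · subst hcx
        simp only [List.count_cons, beq_self_eq_true, if_true, hx]
        omega
      · have hxc : (x == c) = false := by simp [Ne.symm hcx]
        simp [List.count_cons, hxc]

-- counting a character in B's block concatenation
lemma count_flatMap_replicate (l : List Char) (m : Char → Nat) (hnd : l.Nodup) (c : Char) :
    (l.flatMap fun d => List.replicate (m d) d).count c = if c ∈ l then m c else 0 := by
  induction l with
  | nil => simp
  | cons d l ih =>
    simp only [List.flatMap_cons, List.count_append, List.count_replicate,
      ih (List.nodup_cons.mp hnd).2, List.mem_cons]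
    rcases List.nodup_cons.mp hnd with ⟨hdl, _⟩
    by_cases hcd : c = d
    · subst hcd
      simp [hdl]
    · simp [hcd, Ne.symm hcd]

-- blocks of equal characters listed in key-nondecreasing order are key-nondecreasing
lemma pairwise_flatMap_replicate (l : List Char) (m : Char → Nat) (key : Char → Int)
    (hl : l.Pairwise fun a b => key a ≤ key b) :
    (l.flatMap fun d => List.replicate (m d) d).Pairwise fun a b => key a ≤ key b := by
  induction hl with
  | nil => simp
  | @cons d l hdl hl' ih =>
    simp only [List.flatMap_cons]
    rw [List.pairwise_append]
    refine ⟨List.pairwise_replicate.mpr (Or.inr le_rfl), ih, ?_⟩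
    intro a ha b hb
    obtain rfl := List.eq_of_mem_replicate ha
    rcases List.mem_flatMap.mp hb with ⟨d', hd', hb'⟩
    have hb2 := List.eq_of_mem_replicate hb'
    rw [hb2]
    exact hdl d' hd'

lemma D10_nodup : D10.Nodup := by decide

-- the hundred-case digit facts, by computation
lemma aKey_antisymm_on_digits :
    ∀ a ∈ D10, ∀ b ∈ D10, aKey a ≤ aKey b → aKey b ≤ aKey a → a = b := by
  intro a ha b hb h1 h2
  fin_cases ha <;> fin_cases hb <;> first | rfl | (exfalso; revert h1 h2; decide)

lemma aKey_pairwise_D10 : D10.Pairwise fun a b => aKey a ≤ aKey b := by decide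

-- the common-digit multiset and the canonical descending list it determines
def commonBlocks (sx sy : List Char) : List Char :=
  D10.flatMap fun d => List.replicate (min (sx.count d) (sy.count d)) d

lemma twin_eq_commonBlocks_counts (sx sy : List Char)
    (hsx : ∀ c ∈ sx, c = '-' ∨ c ∈ D10)
    (hneg : min (sx.count '-') (sy.count '-') = 0) :
    ((sx.foldl aStep (PySem.Dict.counter sy, [])).2).Perm (commonBlocks sx sy) := by
  rw [List.perm_iff_count]
  intro c
  have hcnt : ((sx.foldl aStep (PySem.Dict.counter sy, [])).2).count c
      = min (sx.count c) (sy.count c) := by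
    rw [aLoop_count sx _ [] (fun c' => by rw [PySem.Dict.getD_counter]; positivity) c]
    rw [PySem.Dict.getD_counter]
    simp
  rw [hcnt, commonBlocks, count_flatMap_replicate _ _ D10_nodup]
  by_cases hc : c ∈ D10
  · rw [if_pos hc]
  · rw [if_neg hc]
    by_cases hcm : c = '-'
    · subst hcm; exact hneg
    · have : c ∉ sx := fun h => by rcases hsx c h with h' | h' <;> [exact hcm h'; exact hc h']
      rw [List.count_eq_zero.mpr this]
      simp

lemma sorted_twin_eq (sx sy : List Char)
    (hsx : ∀ c ∈ sx, c = '-' ∨ c ∈ D10)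
    (hneg : min (sx.count '-') (sy.count '-') = 0) :
    PySem.List.sorted ((sx.foldl aStep (PySem.Dict.counter sy, [])).2) aKey false
      = commonBlocks sx sy := by
  have hperm := twin_eq_commonBlocks_counts sx sy hsx hneg
  set twin := (sx.foldl aStep (PySem.Dict.counter sy, [])).2 with htwin
  refine List.Perm.eq_of_pairwise ?_ (PySem.List.sorted_pairwise _ _) ?_
    ((PySem.List.sorted_perm twin aKey false).trans hperm)
  · intro a b ha hb hab hba
    have ha' : a ∈ twin := (PySem.List.mem_sorted _ _ _ _).mp ha
    have haD : a ∈ D10 := by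
      have hpos : 0 < twin.count a := List.count_pos_iff.mpr ha'
      have := hperm.count_eq a
      rw [commonBlocks, count_flatMap_replicate _ _ D10_nodup] at this
      by_cases haD : a ∈ D10
      · exact haD
      · rw [if_neg haD] at this; omega
    have hbD : b ∈ D10 := by
      unfold commonBlocks at hb
      rcases List.mem_flatMap.mp hb with ⟨d, hd, hbd⟩
      rcases List.eq_of_mem_replicate hbd with rfl
      exact hd
    exact aKey_antisymm_on_digits a haD b hbD hab hba
  · exact pairwise_flatMap_replicate _ _ _ aKey_pairwise_D10

-- ===== VERDICT (by name: the statement is the Claim_ definition above) =====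
set_option maxHeartbeats 1000000 in
theorem solution_spec : Claim_equal_solution := by
  intro X Y _ hpre
  unfold Spec_solution solution solution_alt
  set sx := (PySem.Int.toStr X).toList with hsxdef
  set sy := (PySem.Int.toStr Y).toList with hsydef
  have hxc : sx = PySem.Int.toChars X := by rw [hsxdef, PySem.Int.toList_toStr]
  have hyc : sy = PySem.Int.toChars Y := by rw [hsydef, PySem.Int.toList_toStr]
  have hsx : ∀ c ∈ sx, c = '-' ∨ c ∈ D10 := fun c h => mem_toChars X c (hxc ▸ h)
  have hneg : min (sx.count '-') (sy.count '-') = 0 := by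
    rcases hpre with h | h
    · have h0 : sx.count '-' = 0 := List.count_eq_zero.mpr
        (by rw [hxc]; exact neg_not_mem_toChars X h)
      rw [h0]; simp
    · have h0 : sy.count '-' = 0 := List.count_eq_zero.mpr
        (by rw [hyc]; exact neg_not_mem_toChars Y h)
      rw [h0]; simp
  dsimp only
  -- identify A's dict with Counter(sy)
  rw [show sy.foldl (fun d y => d.modify y 0 (fun v => v + 1)) PySem.Dict.empty
      = PySem.Dict.counter sy from (PySem.Dict.counter_eq_foldl sy).symm]
  -- identify B's list with commonBlocks
  have hB : ("9876543210".toList.foldl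
      (fun ps d => ps ++ [List.replicate
        (min ((PySem.Dict.counter sx).getD d 0) ((PySem.Dict.counter sy).getD d 0)).toNat d]) []).flatten
      = commonBlocks sx sy := by
    rw [PySem.List.foldl_append_singleton_eq_map]
    rw [show ("9876543210".toList) = D10 from by decide]
    rw [List.nil_append, commonBlocks, List.flatMap_def]
    congr 1
    apply List.map_congr_left
    intro d _
    rw [PySem.Dict.getD_counter, PySem.Dict.getD_counter]
    congr 1
    omega
  rw [hB]
  have hA := sorted_twin_eq sx sy hsx hneg
  set twin := (sx.foldl aStep (PySem.Dict.counter sy, [])).2 with htwin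
  have hlen : twin.length = (commonBlocks sx sy).length :=
    (twin_eq_commonBlocks_counts sx sy hsx hneg).length_eq
  by_cases hnil : commonBlocks sx sy = []
  · rw [if_pos (by rw [hlen, hnil]; rfl), if_pos hnil]
  · have hne : ¬ twin.length = 0 := by
      rw [hlen]; intro h; exact hnil (List.length_eq_zero_iff.mp h)
    rw [if_neg hne, if_neg hnil, hA]

set_option maxHeartbeats 1000000 in
@[simp]
theorem solution_raises : Claim_raises_solution := by
  unfold Claim_raises_solution
  constructor
  · intro X Y _ hr hp
    rcases hr with ⟨h1, h2⟩
    rcases hp with h | h <;> omega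
  · exact ⟨by decide, by decide, by decide⟩
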